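-- pv_equiv track=rewrite | github.com/kylebower/leetcode | 0748-shortest-completing-word/0748-shortest-completing-word.py | completing
-- ===== SOURCE A (Python) =====
-- def completing(w: str, d_lp: dict) -> bool:
--     # return True if w is a completing word, else False
--     d_w = {}
--     for c in w:
--         d_w[c] = d_w.get(c,0)+1
--     for key in d_lp:
--         if d_lp[key] > d_w.get(key,0):
--             return False
--     return True
-- ===== SOURCE B (Python) =====
-- def completing(w: str, d_lp: dict) -> bool:
--     # Alternative: no precomputed count table; scan w on demand for each required key.
--     for key in d_lp:
--         cnt = 0
--         for c in w:
--             if c == key: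
--                 cnt += 1
--         if d_lp[key] > cnt:
--             return False
--     return True
-- ===== Notes on version B (the rewrite author's own statement) =====
-- stated objective: alternative
-- what changed: Replaces A's build-a-count-table-then-check strategy with on-demand scanning: for each required key, w is scanned directly counting equal characters, with no dictionary of counts ever built.
import Mathlib
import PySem

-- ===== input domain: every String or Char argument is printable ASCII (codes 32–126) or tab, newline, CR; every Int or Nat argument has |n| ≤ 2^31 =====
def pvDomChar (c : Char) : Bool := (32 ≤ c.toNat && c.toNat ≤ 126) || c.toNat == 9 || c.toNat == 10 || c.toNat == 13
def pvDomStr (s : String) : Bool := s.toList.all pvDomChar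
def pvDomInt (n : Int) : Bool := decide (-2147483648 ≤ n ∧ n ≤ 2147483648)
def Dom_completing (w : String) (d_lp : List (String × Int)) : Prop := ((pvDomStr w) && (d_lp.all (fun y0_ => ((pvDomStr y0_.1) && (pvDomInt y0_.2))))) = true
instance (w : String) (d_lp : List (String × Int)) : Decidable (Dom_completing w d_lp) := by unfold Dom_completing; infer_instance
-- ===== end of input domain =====

-- B drops A's precomputed character-count dictionary and instead re-scans w once per required key; an alternative decomposition of the same check.


-- ===== PORT A =====
-- d_w = {}; for c in w: d_w[c] = d_w.get(c, 0) + 1   (dict keyed by the 1-char strings of w)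
-- for key in d_lp: if d_lp[key] > d_w.get(key, 0): return False;  return True
def completing (w : String) (d_lp : List (String × Int)) : Bool :=
  let d_w : PySem.Dict String Int :=
    w.toList.foldl (fun d c => d.modify (String.ofList [c]) 0 (· + 1)) PySem.Dict.empty
  (PySem.Dict.ofList d_lp).items.all (fun kv =>
    if kv.2 > d_w.getD kv.1 0 then false else true)

-- ===== PORT B =====
-- for key in d_lp: cnt = 0; for c in w: if c == key: cnt += 1; if d_lp[key] > cnt: return False;  return True
def completing_alt (w : String) (d_lp : List (String × Int)) : Bool :=
  (PySem.Dict.ofList d_lp).items.all (fun kv =>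
    if kv.2 > w.toList.foldl
        (fun cnt c => if String.ofList [c] == kv.1 then cnt + 1 else cnt) (0 : Int)
    then false else true)

-- ===== PRECONDITION & SPEC =====
def Spec_completing (w : String) (d_lp : List (String × Int)) (out : Bool) : Prop := out = completing_alt w d_lp
instance (w : String) (d_lp : List (String × Int)) (out : Bool) : Decidable (Spec_completing w d_lp out) := by unfold Spec_completing; infer_instance

-- ===== CLAIM (what is proved, stated in full; the proofs are below) =====
def Claim_equal_completing : Prop := ∀ (w : String) (d_lp : List (String × Int)), Dom_completing w d_lp → Spec_completing w d_lp (completing w d_lp)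

-- ===== LEMMAS AND PROOFS =====

-- A's count dict, read back at key k, is the number of characters of w equal (as 1-char strings) to k.
theorem getD_foldl_modify_key (cs : List Char) (d : PySem.Dict String Int) (k : String) :
    (cs.foldl (fun d c => d.modify (String.ofList [c]) 0 (· + 1)) d).getD k 0
      = d.getD k 0 + cs.countP (fun c => String.ofList [c] == k) := by
  induction cs generalizing d with
  | nil => simp
  | cons c cs ih =>
    simp only [List.foldl_cons, ih, List.countP_cons]
    rw [PySem.Dict.getD_modify]
    by_cases h : String.ofList [c] = k
    · simp [h]; ring
    · simp [h, Ne.symm h]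

-- B's on-demand counting loop computes the same count.
theorem foldl_count_eq_countP (cs : List Char) (k : String) (n : Int) :
    cs.foldl (fun cnt c => if String.ofList [c] == k then cnt + 1 else cnt) n
      = n + cs.countP (fun c => String.ofList [c] == k) := by
  induction cs generalizing n with
  | nil => simp
  | cons c cs ih =>
    simp only [List.foldl_cons, ih, List.countP_cons]
    split_ifs with h
    · simp; ring
    · simp

-- ===== VERDICT (by name: the statement is the Claim_ definition above) =====
theorem completing_spec : Claim_equal_completing := by
  intro w d_lp _
  unfold Spec_completing completing completing_alt
  simp only [getD_foldl_modify_key, foldl_count_eq_countP, PySem.Dict.getD_empty, zero_add]
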